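-- pv_equiv track=rewrite | github.com/malicious/tracker | notes_v2/add.py | tokenize_domain_ids
-- ===== SOURCE A (Python) =====
-- def tokenize_domain_ids(encoded_domain_ids: str):
--     next_domain_id = ""
--     current_token_start = 0
--
--     while True:
--         next_ampersand_index = encoded_domain_ids.find('&', current_token_start)
--
--         # no more ampersands, return the rest of the string
--         if next_ampersand_index == -1:
--             next_domain_id += encoded_domain_ids[current_token_start:]
--             yield next_domain_id
--             break
--
--         # If this ampersand is part of a pair (encoded), skip the first one
--         if encoded_domain_ids[next_ampersand_index:next_ampersand_index + 2] == '&&':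
--             next_domain_id += encoded_domain_ids[current_token_start:next_ampersand_index + 1]
--             current_token_start = next_ampersand_index + 2
--             continue
--
--         # Otherwise, it just gets to be its own token
--         else:
--             next_domain_id += encoded_domain_ids[current_token_start:next_ampersand_index]
--             yield next_domain_id
--             next_domain_id = ""
--             current_token_start = next_ampersand_index + 1
-- ===== SOURCE B (Python) =====
-- def tokenize_domain_ids(encoded_domain_ids: str):
--     buf = []
--     i = 0
--     n = len(encoded_domain_ids)
--     while i < n:
--         c = encoded_domain_ids[i]
--         if c == '&' and i + 1 < n and encoded_domain_ids[i + 1] == '&':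
--             buf.append('&')
--             i += 2
--         elif c == '&':
--             yield ''.join(buf)
--             buf = []
--             i += 1
--         else:
--             buf.append(c)
--             i += 1
--     yield ''.join(buf)
-- ===== Notes on version B (the rewrite author's own statement) =====
-- stated objective: simpler
-- what changed: Replaced the find-and-slice jump loop (string.find from a moving start index plus slice concatenations) with a plain single character-by-character scan keeping an index and a character buffer.
import Mathlib
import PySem

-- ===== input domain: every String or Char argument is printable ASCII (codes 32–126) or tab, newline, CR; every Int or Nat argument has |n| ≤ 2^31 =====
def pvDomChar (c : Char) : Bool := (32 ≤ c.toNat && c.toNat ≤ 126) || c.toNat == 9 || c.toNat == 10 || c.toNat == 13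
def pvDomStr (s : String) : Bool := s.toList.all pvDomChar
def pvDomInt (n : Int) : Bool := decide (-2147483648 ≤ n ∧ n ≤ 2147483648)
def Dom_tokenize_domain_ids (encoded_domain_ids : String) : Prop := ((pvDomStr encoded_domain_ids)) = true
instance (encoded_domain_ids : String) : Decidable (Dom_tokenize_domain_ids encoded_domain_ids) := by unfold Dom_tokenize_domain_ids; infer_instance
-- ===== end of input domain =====

-- B replaces A's find-and-slice jump loop by a single char-by-char scan (return-value equivalence; objective: simpler).
-- ===== PORT A =====
-- A's loop, working on the suffix from current_token_start: str.find('&', start) is findIdx? on that suffix,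
-- and the slices encoded[start:idx] / encoded[idx:idx+2] are take/drop on that suffix (exact for these in-range slices).
def tokFindLt {p : Char → Bool} : ∀ (l : List Char) (i : Nat), l.findIdx? p = some i → i < l.length := by
  intro l
  induction l with
  | nil => intro i h; simp [List.findIdx?, List.findIdx?.go] at h
  | cons a t ih =>
    intro i h
    rw [List.findIdx?_cons] at h
    by_cases hp : p a
    · simp [hp] at h; subst h; simp
    · simp [hp] at h
      obtain ⟨j, hj, rfl⟩ := h
      have := ih j hj
      simp; omega

def goA (rem : List Char) (next : List Char) : List String :=
  match h : rem.findIdx? (· = '&') with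
  | none => [String.ofList (next ++ rem)]                               -- no more ampersands
  | some i =>
    if (rem.drop i).take 2 = ['&', '&'] then                            -- encoded '&&': skip the first
      goA (rem.drop (i + 2)) (next ++ rem.take (i + 1))
    else                                                                -- a lone '&': its own token
      String.ofList (next ++ rem.take i) :: goA (rem.drop (i + 1)) []
termination_by rem.length
decreasing_by
  · have := tokFindLt _ _ h; simp [List.length_drop]; omega
  · have := tokFindLt _ _ h; simp [List.length_drop]; omega

def tokenize_domain_ids (encoded_domain_ids : String) : List String :=
  goA encoded_domain_ids.toList []

-- ===== PORT B =====
-- Source B: single scan over the characters, a buffer of chars appended at the end, flushed at each lone '&' and at the end.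
def goB : List Char → List Char → List String
  | [], buf => [String.ofList buf]
  | '&' :: '&' :: rest, buf => goB rest (buf ++ ['&'])
  | '&' :: rest, buf => String.ofList buf :: goB rest []
  | c :: rest, buf => goB rest (buf ++ [c])

def tokenize_domain_ids_alt (encoded_domain_ids : String) : List String :=
  goB encoded_domain_ids.toList []

-- ===== PRECONDITION & SPEC =====
def Spec_tokenize_domain_ids (encoded_domain_ids : String) (out : List String) : Prop := out = tokenize_domain_ids_alt encoded_domain_ids
instance (encoded_domain_ids : String) (out : List String) : Decidable (Spec_tokenize_domain_ids encoded_domain_ids out) := by unfold Spec_tokenize_domain_ids; infer_instance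

-- ===== CLAIM =====
def Claim_equal_tokenize_domain_ids : Prop := ∀ (encoded_domain_ids : String), Dom_tokenize_domain_ids encoded_domain_ids → Spec_tokenize_domain_ids encoded_domain_ids (tokenize_domain_ids encoded_domain_ids)

-- ===== LEMMAS AND PROOFS =====
lemma goA_unfold_none (rem next : List Char) (h : rem.findIdx? (· = '&') = none) :
    goA rem next = [String.ofList (next ++ rem)] := by
  rw [goA.eq_def]; split <;> simp_all

lemma goA_unfold_pair (rem next : List Char) (i : Nat) (h : rem.findIdx? (· = '&') = some i)
    (h2 : (rem.drop i).take 2 = ['&', '&']) :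
    goA rem next = goA (rem.drop (i + 2)) (next ++ rem.take (i + 1)) := by
  rw [goA.eq_def]; split <;> simp_all

lemma goA_unfold_lone (rem next : List Char) (i : Nat) (h : rem.findIdx? (· = '&') = some i)
    (h2 : ¬ (rem.drop i).take 2 = ['&', '&']) :
    goA rem next = String.ofList (next ++ rem.take i) :: goA (rem.drop (i + 1)) [] := by
  rw [goA.eq_def]; split <;> simp_all

lemma goA_nil (next : List Char) : goA [] next = [String.ofList next] := by
  rw [goA_unfold_none] <;> simp [List.findIdx?, List.findIdx?.go]

lemma goA_cons_ne (c : Char) (r : List Char) (next : List Char) (hc : ¬ (c = '&')) :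
    goA (c :: r) next = goA r (next ++ [c]) := by
  cases hf : r.findIdx? (· = '&') with
  | none =>
    have h1 : (c :: r).findIdx? (· = '&') = none := by
      simp [List.findIdx?_cons, hc, hf]
    rw [goA_unfold_none _ _ h1, goA_unfold_none _ _ hf]
    simp
  | some j =>
    have h1 : (c :: r).findIdx? (· = '&') = some (j + 1) := by
      simp [List.findIdx?_cons, hc, hf]
    by_cases h2 : (r.drop j).take 2 = ['&', '&']
    · rw [goA_unfold_pair _ _ _ h1 (by simpa using h2), goA_unfold_pair _ _ _ hf h2]
      simp
    · rw [goA_unfold_lone _ _ _ h1 (by simpa using h2), goA_unfold_lone _ _ _ hf h2]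
      simp

lemma goA_amp_amp (r : List Char) (next : List Char) :
    goA ('&' :: '&' :: r) next = goA r (next ++ ['&']) := by
  have h1 : ('&' :: '&' :: r).findIdx? (· = '&') = some 0 := by
    simp [List.findIdx?_cons]
  rw [goA_unfold_pair _ _ _ h1 (by simp)]
  simp

lemma goA_amp (r : List Char) (next : List Char) (hr : r.head? ≠ some '&') :
    goA ('&' :: r) next = String.ofList next :: goA r [] := by
  have h1 : ('&' :: r).findIdx? (· = '&') = some 0 := by
    simp [List.findIdx?_cons]
  rw [goA_unfold_lone _ _ _ h1]
  · simp
  · cases r with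
    | nil => simp
    | cons d r' => simp; intro hd; exact hr (by simp [hd])

lemma goA_eq_goB (rem buf : List Char) : goA rem buf = goB rem buf := by
  induction rem, buf using goB.induct with
  | case1 buf => simp [goA_nil, goB]
  | case2 r buf ih => rw [goA_amp_amp, goB, ih]
  | case3 r buf hne ih =>
    have hr : r.head? ≠ some '&' := by
      cases r with
      | nil => simp
      | cons d r' => simp; intro hd; exact hne r' (by rw [hd])
    rw [goA_amp r buf hr, ih, goB]
    exact hne
  | case4 c r buf hc hne ih =>
    rw [goA_cons_ne c r buf hne, ih, goB]
    · exact hc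
    · exact hne

-- ===== VERDICT =====
theorem tokenize_domain_ids_spec : Claim_equal_tokenize_domain_ids := by
  intro s _
  unfold Spec_tokenize_domain_ids tokenize_domain_ids tokenize_domain_ids_alt
  exact goA_eq_goB _ _
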